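-- pv_equiv track=rewrite | github.com/ksayee/programming_assignments | python/CodingExercises/MergeTwoStringsGivenSize.py | MergeTwoStringsGivenSize
-- ===== SOURCE A (Python) =====
-- def MergeTwoStringsGivenSize(str1,str2,k):
--
--     lst=[]
--     while True:
--         if len(str1)==0:
--             pass
--         elif k<len(str1):
--             lst.append(str1[:k])
--             str1=str1[k:]
--         else:
--             lst.append(str1)
--             str1=''
--
--         if len(str2)==0:
--             pass
--         elif k<len(str2):
--             lst.append(str2[:k])
--             str2=str2[k:]
--         else:
--             lst.append(str2)
--             str2=''
--         if len(str1)==0 and len(str2)==0: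
--             break
--
--     return ''.join(lst)
-- ===== SOURCE B (Python) =====
-- def MergeTwoStringsGivenSize(str1, str2, k):
--     chunks1 = [str1[i:i+k] for i in range(0, len(str1), k)]
--     chunks2 = [str2[i:i+k] for i in range(0, len(str2), k)]
--     out = []
--     for i in range(max(len(chunks1), len(chunks2))):
--         if i < len(chunks1):
--             out.append(chunks1[i])
--         if i < len(chunks2):
--             out.append(chunks2[i])
--     return ''.join(out)
-- ===== Notes on version B (the rewrite author's own statement) =====
-- stated objective: idiomatic
-- what changed: A's single while-loop that consumes both strings in lockstep is replaced by two chunk-splitting comprehensions over range(0, len(s), k) followed by one index-based interleave pass over the chunk lists.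
-- outside the precondition, e.g. on MergeTwoStringsGivenSize('', '', 0): A returns '', B raises ValueError; on MergeTwoStringsGivenSize('a', '', 0): A does not finish within the time limit, B raises ValueError; on MergeTwoStringsGivenSize('ab', 'c', -1): A does not finish within the time limit, B returns ''
import Mathlib
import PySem

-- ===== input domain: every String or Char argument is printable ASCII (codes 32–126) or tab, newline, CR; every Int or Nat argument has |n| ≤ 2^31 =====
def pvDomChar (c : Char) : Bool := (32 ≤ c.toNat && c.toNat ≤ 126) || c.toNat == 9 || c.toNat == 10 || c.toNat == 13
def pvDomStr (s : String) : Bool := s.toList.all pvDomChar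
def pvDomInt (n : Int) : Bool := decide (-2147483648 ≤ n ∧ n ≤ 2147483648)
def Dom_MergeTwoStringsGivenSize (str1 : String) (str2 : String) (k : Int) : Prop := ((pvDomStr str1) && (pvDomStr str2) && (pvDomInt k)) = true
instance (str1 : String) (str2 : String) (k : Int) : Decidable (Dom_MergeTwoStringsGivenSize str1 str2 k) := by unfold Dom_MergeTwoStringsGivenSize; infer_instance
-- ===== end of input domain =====

-- B replaces A's single consume-both while-loop by two k-chunking passes and one index-based interleave pass (objective: idiomatic decomposition, same cost).

-- ===== PORT A =====
-- A's 'while True' loop; the Nat fuel only makes the recursion total (it is never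
-- exhausted under Pre_, which grants k ≥ 1 or both strings empty).
def pvLoopA (k : Int) : Nat → List Char → List Char → List (List Char) → List (List Char)
  | 0, _, _, acc => acc
  | fuel+1, s1, s2, acc =>
    let r1 : List (List Char) × List Char :=
      if s1.length = 0 then (acc, s1)
      else if k < (s1.length : Int) then
        (acc ++ [PySem.List.slice s1 none (some k)], PySem.List.slice s1 (some k) none)
      else (acc ++ [s1], [])
    let r2 : List (List Char) × List Char :=
      if s2.length = 0 then (r1.1, s2)
      else if k < (s2.length : Int) then
        (r1.1 ++ [PySem.List.slice s2 none (some k)], PySem.List.slice s2 (some k) none)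
      else (r1.1 ++ [s2], [])
    if r1.2.length = 0 ∧ r2.2.length = 0 then r2.1
    else pvLoopA k fuel r1.2 r2.2 r2.1

def MergeTwoStringsGivenSize (str1 : String) (str2 : String) (k : Int) : String :=
  String.ofList
    (pvLoopA k (str1.toList.length + str2.toList.length + 1) str1.toList str2.toList []).flatten

-- ===== PORT B =====
-- [s[i:i+k] for i in range(0, len(s), k)]
def pvChunksB (s : List Char) (k : Int) : List (List Char) :=
  (PySem.List.pyRange 0 (s.length : Int) k).map
    (fun i => PySem.List.slice s (some i) (some (i + k)))

def MergeTwoStringsGivenSize_alt (str1 : String) (str2 : String) (k : Int) : String :=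
  let c1 := pvChunksB str1.toList k
  let c2 := pvChunksB str2.toList k
  let out := (PySem.List.pyRange 0 ((max c1.length c2.length : Nat) : Int) 1).foldl
    (fun acc i =>
      let acc := if i < (c1.length : Int) then acc ++ [PySem.List.pyGetD c1 i []] else acc
      if i < (c2.length : Int) then acc ++ [PySem.List.pyGetD c2 i []] else acc) []
  String.ofList out.flatten

-- ===== PRECONDITION & SPEC =====
-- Pre_ excludes k ≤ 0 (except the empty-empty corner with k < 0, where both return ""):
-- there A's while-loop never terminates on any nonempty string, and on ("", "", 0)
-- A returns "" while B's range(0, 0, 0) raises ValueError.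
def Pre_MergeTwoStringsGivenSize (str1 : String) (str2 : String) (k : Int) : Prop :=
  1 ≤ k ∨ (str1 = "" ∧ str2 = "" ∧ k < 0)
instance (str1 : String) (str2 : String) (k : Int) : Decidable (Pre_MergeTwoStringsGivenSize str1 str2 k) := by
  unfold Pre_MergeTwoStringsGivenSize; infer_instance

def pvWitness_MergeTwoStringsGivenSize : String × String × Int := ("abcde", "xy", 2)

def Spec_MergeTwoStringsGivenSize (str1 : String) (str2 : String) (k : Int) (out : String) : Prop := out = MergeTwoStringsGivenSize_alt str1 str2 k
instance (str1 : String) (str2 : String) (k : Int) (out : String) : Decidable (Spec_MergeTwoStringsGivenSize str1 str2 k out) := by unfold Spec_MergeTwoStringsGivenSize; infer_instance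

-- ===== CLAIM (what is proved, stated in full; the proofs are below) =====
def Claim_equal_MergeTwoStringsGivenSize : Prop := ∀ (str1 : String) (str2 : String) (k : Int), Dom_MergeTwoStringsGivenSize str1 str2 k → Pre_MergeTwoStringsGivenSize str1 str2 k → Spec_MergeTwoStringsGivenSize str1 str2 k (MergeTwoStringsGivenSize str1 str2 k)

-- ===== LEMMAS AND PROOFS =====

-- chunks of size kn+1 (reference form both ports are reduced to)
def pvChunksR (kn : Nat) : List Char → List (List Char)
  | [] => []
  | c :: s => ((c :: s).take (kn+1)) :: pvChunksR kn ((c :: s).drop (kn+1))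
  termination_by s => s.length
  decreasing_by simp

-- interleave of two chunk lists
def pvInter : List (List Char) → List (List Char) → List (List Char)
  | [], ys => ys
  | x :: xs, [] => x :: xs
  | x :: xs, y :: ys => x :: y :: pvInter xs ys

theorem pvInter_nil_right (xs : List (List Char)) : pvInter xs [] = xs := by
  cases xs <;> rfl

theorem pvFoldApp (l acc : List (List Char)) :
    List.foldl (fun (acc : List (List Char)) (x : List Char) => acc ++ [x]) acc l = acc ++ l := by
  induction l generalizing acc with
  | nil => simp
  | cons x xs ih => simp [ih]

theorem pyGetD_cons_succ (x : List Char) (xs : List (List Char)) (i : Int) (h : 0 ≤ i) :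
    PySem.List.pyGetD (x :: xs) (i + 1) [] = PySem.List.pyGetD xs i [] := by
  obtain ⟨n, rfl⟩ : ∃ n : Nat, i = (n : Int) := ⟨i.toNat, by omega⟩
  have e : ((n : Int) + 1) = ((n + 1 : Nat) : Int) := by push_cast; ring
  rw [e, PySem.List.pyGetD_natCast, PySem.List.pyGetD_natCast]
  simp

-- range with a positive step: cons form
theorem pyRange_pos_cons (a b k : Int) (hk : 0 < k) (h : a < b) :
    PySem.List.pyRange a b k = a :: PySem.List.pyRange (a+k) b k := by
  rw [PySem.List.pyRange_of_pos _ _ hk, PySem.List.pyRange_of_pos _ _ hk]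
  rw [if_pos h]
  have hnum : b - (a + k) + k - 1 = b - a - 1 := by ring
  have hq0 : 0 ≤ (b - a - 1) / k := Int.ediv_nonneg (by omega) (by omega)
  have hcount : ((b - a + k - 1) / k).toNat
      = ((if a + k < b then ((b - (a + k) + k - 1) / k).toNat else 0)) + 1 := by
    have hsplit : b - a + k - 1 = (b - a - 1) + 1 * k := by ring
    have hdiv : (b - a + k - 1) / k = (b - a - 1) / k + 1 := by
      rw [hsplit, Int.add_mul_ediv_right _ _ (by omega : k ≠ 0)]
    by_cases hc : a + k < b
    · rw [if_pos hc, hnum, hdiv]; omega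
    · rw [if_neg hc, hdiv]
      have : (b - a - 1) / k = 0 := Int.ediv_eq_zero_of_lt (by omega) (by omega)
      omega
  rw [hcount, List.range_succ_eq_map, List.map_cons, List.map_map]
  refine congrArg₂ _ (by simp) ?_
  exact List.map_congr_left (fun j _ => by simp [Function.comp]; ring)

-- range shifted by a constant
theorem pyRange_shift (a b c k : Int) (hk : 0 < k) :
    PySem.List.pyRange (a+c) (b+c) k = (PySem.List.pyRange a b k).map (· + c) := by
  rw [PySem.List.pyRange_of_pos _ _ hk, PySem.List.pyRange_of_pos _ _ hk, List.map_map]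
  have h1 : b + c - (a + c) = b - a := by ring
  simp only [add_lt_add_iff_right]
  rw [h1]
  exact List.map_congr_left (fun j _ => by simp [Function.comp]; ring)

theorem chunksB_eq (kn : Nat) (s : List Char) :
    pvChunksB s ((kn : Int) + 1) = pvChunksR kn s := by
  have hK : (0:Int) < (kn:Int) + 1 := by positivity
  induction s using pvChunksR.induct kn with
  | case1 => simp [pvChunksB, pvChunksR, PySem.List.pyRange_of_pos _ _ hK]
  | case2 c s ih =>
    simp only [pvChunksR]
    unfold pvChunksB
    have hlen : (0:Int) < ((c::s).length : Int) := by simp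
    rw [pyRange_pos_cons 0 _ _ hK hlen, List.map_cons]
    congr 1
    · have ht : ((kn:Int)+1).toNat = kn+1 := by omega
      simp [PySem.List.slice_to (c::s) (by positivity : (0:Int) ≤ (kn:Int)+1), ht]
    · rw [← ih]
      unfold pvChunksB
      by_cases hle : kn ≤ s.length
      · have h1 : (((c::s).length : Nat) : Int) = (((c::s).drop (kn+1)).length : Int) + ((kn:Int)+1) := by
          simp; omega
        rw [h1, pyRange_shift 0 _ _ _ hK, List.map_map]
        refine List.map_congr_left ?_
        intro i hi
        obtain ⟨h0i, h1i, -⟩ := (PySem.List.mem_pyRange_iff_of_pos hK i).1 hi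
        simp only [Function.comp]
        rw [PySem.List.slice_toNat _ (by omega) (by omega),
            PySem.List.slice_toNat _ (by omega) (by omega), List.drop_drop]
        congr 1
        · omega
        · congr 1; omega
      · have hm : ((c::s).drop (kn+1)).length = 0 := by simp; omega
        have hnil : PySem.List.pyRange (0 + ((kn:Int)+1)) (((c::s).length : Nat) : Int) ((kn:Int)+1) = [] := by
          rw [PySem.List.pyRange_of_pos _ _ hK, if_neg (by simp; omega)]
          simp
        rw [hnil, hm]
        simp [PySem.List.pyRange_of_pos _ _ hK]

theorem stepChunk (kn : Nat) (s : List Char) (acc : List (List Char)) :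
    (if ((kn:Int)+1) < (s.length : Int) then
       (acc ++ [PySem.List.slice s none (some ((kn:Int)+1))], PySem.List.slice s (some ((kn:Int)+1)) none)
     else (acc ++ [s], ([] : List Char)))
    = (acc ++ [s.take (kn+1)], s.drop (kn+1)) := by
  by_cases h : ((kn:Int)+1) < (s.length : Int)
  · rw [if_pos h, PySem.List.slice_to s (by positivity), PySem.List.slice_from s (by positivity)]
    have ht : ((kn:Int)+1).toNat = kn+1 := by omega
    rw [ht]
  · rw [if_neg h]
    have hlen : s.length ≤ kn+1 := by omega
    rw [List.take_of_length_le hlen, List.drop_eq_nil_of_le hlen]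

theorem chunksR_cons_drop (kn : Nat) (s : List Char) (hs : s ≠ []) :
    pvChunksR kn s = s.take (kn+1) :: pvChunksR kn (s.drop (kn+1)) := by
  cases s with
  | nil => exact absurd rfl hs
  | cons c cs => rw [pvChunksR]

theorem loopA_eq (kn : Nat) (fuel : Nat) (s1 s2 : List Char) (acc : List (List Char))
    (hf : s1.length + s2.length < fuel) :
    pvLoopA ((kn : Int) + 1) fuel s1 s2 acc = acc ++ pvInter (pvChunksR kn s1) (pvChunksR kn s2) := by
  induction fuel generalizing s1 s2 acc with
  | zero => omega
  | succ fuel ih =>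
    by_cases h1 : s1.length = 0
    · by_cases h2 : s2.length = 0
      · have e1 : s1 = [] := List.eq_nil_of_length_eq_zero h1
        have e2 : s2 = [] := List.eq_nil_of_length_eq_zero h2
        subst e1; subst e2
        simp [pvLoopA, pvChunksR, pvInter]
      · -- s1 empty, s2 nonempty
        have e1 : s1 = [] := List.eq_nil_of_length_eq_zero h1
        subst e1
        simp only [pvLoopA, List.length_nil, ite_true, if_neg h2, stepChunk kn s2]
        rw [chunksR_cons_drop kn s2 (by intro h; exact h2 (by simp [h]))]
        by_cases hend : (s2.drop (kn+1)).length = 0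
        · rw [if_pos ⟨trivial, hend⟩]
          have : s2.drop (kn+1) = [] := List.eq_nil_of_length_eq_zero hend
          simp [this, pvChunksR, pvInter]
        · rw [if_neg (by simp [List.length_drop] at hend ⊢; omega)]
          rw [ih [] (s2.drop (kn+1)) _ (by simp at hf ⊢; omega)]
          simp [pvChunksR, pvInter]
    · by_cases h2 : s2.length = 0
      · -- s1 nonempty, s2 empty
        have e2 : s2 = [] := List.eq_nil_of_length_eq_zero h2
        subst e2
        simp only [pvLoopA, List.length_nil, ite_true, if_neg h1, stepChunk kn s1]
        rw [chunksR_cons_drop kn s1 (by intro h; exact h1 (by simp [h]))]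
        by_cases hend : (s1.drop (kn+1)).length = 0
        · rw [if_pos ⟨hend, trivial⟩]
          have : s1.drop (kn+1) = [] := List.eq_nil_of_length_eq_zero hend
          simp [this, pvChunksR, pvInter_nil_right]
        · rw [if_neg (by simp [List.length_drop] at hend ⊢; omega)]
          rw [ih (s1.drop (kn+1)) [] _ (by simp at hf ⊢; omega)]
          simp [pvChunksR, pvInter_nil_right]
      · -- both nonempty
        simp only [pvLoopA, if_neg h1, if_neg h2, stepChunk kn s1, stepChunk kn s2]
        rw [chunksR_cons_drop kn s1 (by intro h; exact h1 (by simp [h])),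
            chunksR_cons_drop kn s2 (by intro h; exact h2 (by simp [h]))]
        by_cases he1 : (s1.drop (kn+1)).length = 0
        · by_cases he2 : (s2.drop (kn+1)).length = 0
          · rw [if_pos ⟨he1, he2⟩]
            have d1 : s1.drop (kn+1) = [] := List.eq_nil_of_length_eq_zero he1
            have d2 : s2.drop (kn+1) = [] := List.eq_nil_of_length_eq_zero he2
            simp [d1, d2, pvChunksR, pvInter]
          · rw [if_neg (by simp [List.length_drop] at he2 ⊢; omega)]
            rw [ih _ _ _ (by simp only [List.length_drop]; omega)]
            simp [pvInter]
        · rw [if_neg (by simp [List.length_drop] at he1 ⊢; omega)]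
          rw [ih _ _ _ (by simp only [List.length_drop]; omega)]
          simp [pvInter]

theorem interB_eq (c1 c2 : List (List Char)) (acc : List (List Char)) :
    (PySem.List.pyRange 0 ((max c1.length c2.length : Nat) : Int) 1).foldl
      (fun acc i =>
        let acc := if i < (c1.length : Int) then acc ++ [PySem.List.pyGetD c1 i []] else acc
        if i < (c2.length : Int) then acc ++ [PySem.List.pyGetD c2 i []] else acc) acc
    = acc ++ pvInter c1 c2 := by
  induction c1 generalizing c2 acc with
  | nil =>
    rw [PySem.List.foldl_congr_mem _ _
      (fun acc i => acc ++ [PySem.List.pyGetD c2 i []]) acc ?_]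
    · simp only [List.length_nil, Nat.zero_max]
      rw [PySem.List.foldl_pyRange_zero_pyGetD' c2 [] (fun acc x => acc ++ [x]) acc,
          pvFoldApp]
      simp [pvInter]
    · intro acc' i hi
      obtain ⟨h0, h1⟩ := PySem.List.mem_pyRange_one.1 hi
      simp only [List.length_nil, Nat.zero_max] at h1
      simp only [List.length_nil, Nat.cast_zero]
      rw [if_pos (by exact_mod_cast h1), if_neg (by omega)]
  | cons x xs ih =>
    cases c2 with
    | nil =>
      rw [PySem.List.foldl_congr_mem _ _
        (fun acc i => acc ++ [PySem.List.pyGetD (x :: xs) i []]) acc ?_]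
      · simp only [List.length_nil, Nat.max_zero]
        rw [PySem.List.foldl_pyRange_zero_pyGetD' (x :: xs) [] (fun acc x => acc ++ [x]) acc,
            pvFoldApp]
        rw [pvInter_nil_right]
      · intro acc' i hi
        obtain ⟨h0, h1⟩ := PySem.List.mem_pyRange_one.1 hi
        simp only [List.length_nil, Nat.max_zero] at h1
        simp only [List.length_nil, Nat.cast_zero]
        rw [if_neg (by omega), if_pos (by exact_mod_cast h1)]
    | cons y ys =>
      have hmax : max (x :: xs).length (y :: ys).length = (max xs.length ys.length) + 1 := by
        simp [Nat.succ_max_succ]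
      rw [hmax]
      have hcast : (((max xs.length ys.length) + 1 : Nat) : Int)
          = ((max xs.length ys.length : Nat) : Int) + 1 := by push_cast; ring
      rw [hcast, PySem.List.pyRange_one_cons (by positivity), List.foldl_cons]
      rw [show PySem.List.pyRange (0+1) (((max xs.length ys.length : Nat) : Int) + 1) 1
            = (PySem.List.pyRange 0 ((max xs.length ys.length : Nat) : Int) 1).map (· + 1)
          from pyRange_shift 0 _ 1 1 (by omega), List.foldl_map]
      -- the step at index 0 takes both heads
      have hstep0 : (let acc' := if (0:Int) < ((x :: xs).length : Int) then acc ++ [PySem.List.pyGetD (x :: xs) 0 []] else acc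
            if (0:Int) < ((y :: ys).length : Int) then acc' ++ [PySem.List.pyGetD (y :: ys) 0 []] else acc')
          = acc ++ [x] ++ [y] := by
        simp [PySem.List.pyGetD_zero_cons]
      rw [hstep0]
      rw [PySem.List.foldl_congr_mem _ _
        (fun acc i =>
          let acc := if i < (xs.length : Int) then acc ++ [PySem.List.pyGetD xs i []] else acc
          if i < (ys.length : Int) then acc ++ [PySem.List.pyGetD ys i []] else acc)
        (acc ++ [x] ++ [y]) ?_]
      · rw [ih ys (acc ++ [x] ++ [y])]
        simp [pvInter]
      · intro acc' i hi
        obtain ⟨h0, -⟩ := PySem.List.mem_pyRange_one.1 hi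
        simp only [List.length_cons, Nat.cast_add, Nat.cast_one, add_lt_add_iff_right,
          pyGetD_cons_succ x xs i h0, pyGetD_cons_succ y ys i h0]

-- ===== VERDICT (by name: the statement is the Claim_ definition above) =====
theorem MergeTwoStringsGivenSize_spec : Claim_equal_MergeTwoStringsGivenSize := by
  intro str1 str2 k _ hpre
  unfold Spec_MergeTwoStringsGivenSize
  rcases hpre with hk | ⟨h1, h2, hneg⟩
  · obtain ⟨kn, rfl⟩ : ∃ kn : Nat, k = (kn : Int) + 1 :=
      ⟨(k - 1).toNat, by omega⟩
    unfold MergeTwoStringsGivenSize MergeTwoStringsGivenSize_alt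
    rw [loopA_eq kn _ _ _ _ (by omega)]
    simp only [chunksB_eq, interB_eq, List.nil_append]
  · subst h1; subst h2
    unfold MergeTwoStringsGivenSize MergeTwoStringsGivenSize_alt
    have hk0 : k ≠ 0 := by omega
    simp [pvLoopA, pvChunksB, PySem.List.pyRange, hk0]
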